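-- pv_equiv track=rewrite | github.com/KossiPascal/analytics-core | backend/src/routes/datasets/chart/chart_engine.py | pivot_rows_to_columns
-- ===== SOURCE A (Python) =====
-- def pivot_rows_to_columns(rows: list[dict]) -> list[dict]:
--     """
--     Transforme: [ {"month": "Jan", "sales": 10}, {"month": "Feb", "sales": 20} ]
--     En: [ {"field": "month", "Jan": "Jan", "Feb": "Feb"}, {"field": "sales", "Jan": 10, "Feb": 20}]
--     """
--     if not rows:
--         return []
--
--     result = {}
--     for idx, row in enumerate(rows):
--         col_key = f"row_{idx+1}"
--         for key, value in row.items():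
--             result.setdefault(key, {"field": key})
--             result[key][col_key] = value
--
--     return list(result.values())
-- ===== SOURCE B (Python) =====
-- def pivot_rows_to_columns(rows: list[dict]) -> list[dict]:
--     # Field-major transpose: collect field names in first-seen order, then
--     # build each field's column dict by scanning the rows for that field.
--     fields = list(dict.fromkeys(key for row in rows for key in row))
--     columns = []
--     for field in fields:
--         col = {"field": field}
--         for idx, row in enumerate(rows):
--             if field in row:
--                 col[f"row_{idx+1}"] = row[field]
--         columns.append(col)
--     return columns
-- ===== Notes on version B (the rewrite author's own statement) =====
-- stated objective: alternative
-- what changed: B inverts the loop nesting: it first collects the field names in first-seen order with dict.fromkeys, then builds each field's column dict by one field-major scan over the rows, instead of A's row-major stamping into a dict of dicts via setdefault.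
import Mathlib
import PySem

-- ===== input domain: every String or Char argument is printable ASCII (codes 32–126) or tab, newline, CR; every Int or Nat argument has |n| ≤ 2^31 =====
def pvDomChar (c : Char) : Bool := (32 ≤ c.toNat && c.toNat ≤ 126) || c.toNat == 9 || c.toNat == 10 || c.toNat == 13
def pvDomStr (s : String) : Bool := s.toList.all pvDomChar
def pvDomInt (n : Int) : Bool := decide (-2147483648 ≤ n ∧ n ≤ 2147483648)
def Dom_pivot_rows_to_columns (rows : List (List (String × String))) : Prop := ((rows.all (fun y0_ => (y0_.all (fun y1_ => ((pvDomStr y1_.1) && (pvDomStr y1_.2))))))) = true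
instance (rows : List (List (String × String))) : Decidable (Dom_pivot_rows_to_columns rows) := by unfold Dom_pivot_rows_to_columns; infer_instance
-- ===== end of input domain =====

-- B re-implements the pivot field-major (collect field order, then scan rows per field)
-- instead of A's row-major dict-of-dicts stamping; equal output, alternative decomposition.


-- shared helper: the f-string f"row_{idx+1}" both Pythons build
def pvColKey (i : Int) : String := "row_" ++ PySem.Int.toStr (i + 1)

-- ===== PORT A =====
def pivot_rows_to_columns (rows : List (List (String × String))) : List (List (String × String)) :=
  if rows = [] then []
  else
    let result : PySem.Dict String (PySem.Dict String String) :=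
      (PySem.List.enumerate rows 0).foldl
        (fun result p =>
          let colKey := pvColKey p.1
          p.2.foldl
            (fun result kv =>
              let r := result.setdefault kv.1 (PySem.Dict.ofList [("field", kv.1)])
              -- result[key][col_key] = value  (key is present after setdefault)
              r.modify kv.1 PySem.Dict.empty (fun d => d.insert colKey kv.2))
            result)
        PySem.Dict.empty
    result.values.map (fun d => d.items)

-- ===== PORT B =====
-- col is a Python dict, but its keys "field", "row_i1", "row_i2", … (i strictly increasing)
-- are pairwise distinct, so each dict insertion is exactly a list append; the
-- 'field in row' test plus 'row[field]' lookup is one first-match find? on the assoc list.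
def pivot_rows_to_columns_alt (rows : List (List (String × String))) : List (List (String × String)) :=
  let fields := PySem.List.dedup (rows.flatMap (fun row => row.map (·.1)))
  fields.map (fun field =>
    (PySem.List.enumerate rows 0).foldl
      (fun col p =>
        match p.2.find? (fun kv => kv.1 == field) with
        | some kv => col ++ [(pvColKey p.1, kv.2)]
        | none => col)
      [("field", field)])

-- ===== PRECONDITION & SPEC =====
-- Pre_ excludes rows whose association list repeats a key: such a list does not represent a
-- Python dict (the type convention's source of these inputs), and A reads the last duplicate
-- where B reads the first.  Every actual Python input (a list of dicts) satisfies Pre_.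
def Pre_pivot_rows_to_columns (rows : List (List (String × String))) : Prop :=
  ∀ row ∈ rows, (row.map Prod.fst).Nodup
instance (rows : List (List (String × String))) : Decidable (Pre_pivot_rows_to_columns rows) := by unfold Pre_pivot_rows_to_columns; infer_instance

def pvWitness_pivot_rows_to_columns : (List (List (String × String))) :=
  [[("month", "Jan"), ("sales", "10")], [("month", "Feb")]]

def Spec_pivot_rows_to_columns (rows : List (List (String × String))) (out : List (List (String × String))) : Prop := out = pivot_rows_to_columns_alt rows
instance (rows : List (List (String × String))) (out : List (List (String × String))) : Decidable (Spec_pivot_rows_to_columns rows out) := by unfold Spec_pivot_rows_to_columns; infer_instance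

-- ===== CLAIM (what is proved, stated in full; the proofs are below) =====
def Claim_equal_pivot_rows_to_columns : Prop := ∀ (rows : List (List (String × String))), Dom_pivot_rows_to_columns rows → Pre_pivot_rows_to_columns rows → Spec_pivot_rows_to_columns rows (pivot_rows_to_columns rows)

-- ===== LEMMAS AND PROOFS =====

-- proof-side abbreviations for the two loop bodies
def pvMkF (k : String) : PySem.Dict String String := PySem.Dict.ofList [("field", k)]

def pvStep (ck : String) (res : PySem.Dict String (PySem.Dict String String))
    (kv : String × String) : PySem.Dict String (PySem.Dict String String) :=
  (res.setdefault kv.1 (pvMkF kv.1)).modify kv.1 PySem.Dict.empty (fun d => d.insert ck kv.2)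

def pvOuter (res : PySem.Dict String (PySem.Dict String String))
    (l : List (Int × List (String × String))) : PySem.Dict String (PySem.Dict String String) :=
  l.foldl (fun res p => p.2.foldl (pvStep (pvColKey p.1)) res) res

def pvFind (f : String) (row : List (String × String)) : Option (String × String) :=
  row.find? (fun kv => kv.1 == f)

def pvAdd (f : String) (c : PySem.Dict String String)
    (l : List (Int × List (String × String))) : PySem.Dict String String :=
  l.foldl (fun c p =>
    match pvFind f p.2 with
    | some kv => c.insert (pvColKey p.1) kv.2
    | none => c) c

def pvCols (f : String) (l : List (Int × List (String × String))) : List (String × String) :=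
  l.flatMap (fun p =>
    match pvFind f p.2 with
    | some kv => [(pvColKey p.1, kv.2)]
    | none => [])

-- injectivity of str(n) on naturals, hence of pvColKey on the nonnegative enumerate indices
lemma toDigits10_inj (a b : Nat) (h : Nat.toDigits 10 a = Nat.toDigits 10 b) : a = b := by
  have hdc : ∀ m : Nat, m < 10 → ∀ k : Nat, k < 10 → Nat.digitChar m = Nat.digitChar k → m = k := by decide
  induction a using Nat.strong_induction_on generalizing b with
  | _ a ih =>
    rcases Nat.lt_or_ge a 10 with ha | ha
    · rcases Nat.lt_or_ge b 10 with hb | hb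
      · rw [Nat.toDigits_of_lt_base ha, Nat.toDigits_of_lt_base hb] at h
        exact hdc a ha b hb (by simpa using h)
      · exfalso
        rw [Nat.toDigits_of_lt_base ha, Nat.toDigits_of_base_le (by norm_num) hb] at h
        have hl := congrArg List.length h
        have hp := @Nat.length_toDigits_pos 10 (b / 10)
        simp [List.length_append] at hl
        simp [hl] at hp
    · rcases Nat.lt_or_ge b 10 with hb | hb
      · exfalso
        rw [Nat.toDigits_of_lt_base hb, Nat.toDigits_of_base_le (by norm_num) ha] at h
        have hl := congrArg List.length h
        have hp := @Nat.length_toDigits_pos 10 (a / 10)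
        simp [List.length_append] at hl
        simp [hl] at hp
      · rw [Nat.toDigits_of_base_le (by norm_num) ha, Nat.toDigits_of_base_le (by norm_num) hb] at h
        obtain ⟨h1, h2⟩ := List.append_inj' h (by simp)
        have hm : a % 10 = b % 10 :=
          hdc _ (Nat.mod_lt _ (by norm_num)) _ (Nat.mod_lt _ (by norm_num)) (by simpa using h2)
        have hd : a / 10 = b / 10 := ih (a / 10) (Nat.div_lt_self (by omega) (by norm_num)) (b / 10) h1
        omega

lemma pvColKey_inj {i j : Int} (hi : 0 ≤ i) (hj : 0 ≤ j) (h : pvColKey i = pvColKey j) : i = j := by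
  simp only [pvColKey] at h
  have h2 := congrArg String.toList h
  simp [PySem.Int.toList_toStr] at h2
  simp [PySem.Int.toChars, show ¬ (i+1 < 0) by omega, show ¬ (j+1 < 0) by omega] at h2
  have := toDigits10_inj _ _ h2
  omega

lemma pvColKey_ne_field (i : Int) : pvColKey i ≠ "field" := by
  intro h
  have h2 := congrArg String.toList h
  simp [pvColKey, PySem.Int.toList_toStr] at h2

-- effect of one row's inner loop on a single key, and on the key list
lemma get?_rowfold (ck : String) (res : PySem.Dict String (PySem.Dict String String))
    (row : List (String × String)) (hnd : (row.map Prod.fst).Nodup) (f : String) :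
    (row.foldl (pvStep ck) res).get? f =
      match pvFind f row with
      | some kv => some (((res.get? f).getD (pvMkF f)).insert ck kv.2)
      | none => res.get? f := by
  induction row generalizing res with
  | nil => simp [pvFind]
  | cons kv rest ih =>
    obtain ⟨k, v⟩ := kv
    simp only [List.map_cons, List.nodup_cons] at hnd
    rw [List.foldl_cons, ih _ hnd.2]
    by_cases hf : f = k
    · subst hf
      have hrest : pvFind f rest = none := by
        rw [pvFind, List.find?_eq_none]
        intro x hx
        simp only [beq_iff_eq]
        intro hxf
        exact hnd.1 (hxf ▸ List.mem_map_of_mem hx)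
      have hhead : pvFind f ((f, v) :: rest) = some (f, v) := by simp [pvFind]
      rw [hrest, hhead]
      simp only [pvStep, PySem.Dict.modify]
      rw [PySem.Dict.get?_insert_self]
      rw [PySem.Dict.getD_setdefault_self, PySem.Dict.getD_eq_get?_getD]
    · have hhead : pvFind f ((k, v) :: rest) = pvFind f rest := by
        simp [pvFind, show (k == f) = false from beq_eq_false_iff_ne.mpr (Ne.symm hf)]
      rw [hhead]
      have hstep : (pvStep ck res (k, v)).get? f = res.get? f := by
        simp only [pvStep, PySem.Dict.modify]
        rw [PySem.Dict.get?_insert_of_ne _ _ hf, PySem.Dict.get?_setdefault_of_ne _ _ hf]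
      rw [hstep]

lemma keys_rowfold (ck : String) (res : PySem.Dict String (PySem.Dict String String))
    (row : List (String × String)) :
    (row.foldl (pvStep ck) res).keys = PySem.Set.update res.keys (row.map Prod.fst) := by
  induction row generalizing res with
  | nil => simp [PySem.Set.update_nil]
  | cons kv rest ih =>
    rw [List.foldl_cons, ih, List.map_cons, PySem.Set.update_cons]
    congr 1
    simp only [pvStep, PySem.Dict.modify]
    by_cases hc : res.contains kv.1
    · rw [PySem.Dict.setdefault_of_contains _ _ hc]
      rw [PySem.Dict.keys_insert_of_contains _ _ hc]
      exact (PySem.Set.add_of_mem (by rwa [PySem.Dict.contains_iff_mem_keys] at hc)).symm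
    · rw [PySem.Dict.setdefault_of_not_contains _ _ (by simpa using hc)]
      rw [PySem.Dict.keys_insert_of_contains _ _ (by simp)]
      rw [PySem.Dict.keys_insert_of_not_contains _ _ (by simpa using hc)]
      exact (PySem.Set.add_of_not_mem (by rw [← PySem.Dict.contains_iff_mem_keys]; simpa using hc)).symm

lemma keys_outer (res : PySem.Dict String (PySem.Dict String String))
    (l : List (Int × List (String × String))) :
    (pvOuter res l).keys = PySem.Set.update res.keys (l.flatMap (fun p => p.2.map Prod.fst)) := by
  induction l generalizing res with
  | nil => simp [pvOuter, PySem.Set.update_nil]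
  | cons p l ih =>
    rw [pvOuter, List.foldl_cons, ← pvOuter, ih, List.flatMap_cons, PySem.Set.update_append,
      keys_rowfold]

lemma mem_flatMap_keys_iff (f : String) (l : List (Int × List (String × String))) :
    f ∈ l.flatMap (fun p => p.2.map Prod.fst) ↔ ∃ p ∈ l, (pvFind f p.2).isSome := by
  simp only [List.mem_flatMap, List.mem_map, pvFind, List.find?_isSome, beq_iff_eq]

lemma get?_outer (res : PySem.Dict String (PySem.Dict String String))
    (l : List (Int × List (String × String)))
    (hrows : ∀ p ∈ l, (p.2.map Prod.fst).Nodup) (f : String) :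
    (pvOuter res l).get? f =
      match res.get? f with
      | some c => some (pvAdd f c l)
      | none =>
        if f ∈ l.flatMap (fun p => p.2.map Prod.fst) then some (pvAdd f (pvMkF f) l)
        else none := by
  induction l generalizing res with
  | nil =>
    cases hres : res.get? f <;> simp [pvOuter, pvAdd, hres]
  | cons p l ih =>
    rw [pvOuter, List.foldl_cons, ← pvOuter]
    rw [ih _ (fun q hq => hrows q (List.mem_cons_of_mem _ hq))]
    rw [get?_rowfold _ _ _ (hrows p List.mem_cons_self) f]
    cases hfind : pvFind f p.2 with
    | some kv =>
      have hmem : f ∈ (p :: l).flatMap (fun q => q.2.map Prod.fst) := by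
        rw [mem_flatMap_keys_iff]
        exact ⟨p, List.mem_cons_self, by rw [hfind]; rfl⟩
      cases hres : res.get? f with
      | some c =>
        simp only [Option.getD_some]
        have h2 : pvAdd f c (p :: l) = pvAdd f (c.insert (pvColKey p.1) kv.2) l := by
          rw [pvAdd, List.foldl_cons, hfind]; rfl
        rw [h2]
      | none =>
        simp only [Option.getD_none, if_pos hmem]
        have h2 : pvAdd f (pvMkF f) (p :: l) = pvAdd f ((pvMkF f).insert (pvColKey p.1) kv.2) l := by
          rw [pvAdd, List.foldl_cons, hfind]; rfl
        rw [h2]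
    | none =>
      have hmem : f ∈ (p :: l).flatMap (fun q => q.2.map Prod.fst) ↔ f ∈ l.flatMap (fun q => q.2.map Prod.fst) := by
        rw [mem_flatMap_keys_iff, mem_flatMap_keys_iff]
        constructor
        · rintro ⟨q, hq, hs⟩
          rcases List.mem_cons.mp hq with rfl | hq
          · rw [hfind] at hs; simp at hs
          · exact ⟨q, hq, hs⟩
        · rintro ⟨q, hq, hs⟩; exact ⟨q, List.mem_cons_of_mem _ hq, hs⟩
      have hadd : ∀ c, pvAdd f c (p :: l) = pvAdd f c l := by
        intro c; rw [pvAdd, List.foldl_cons, hfind]; rfl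
      cases hres : res.get? f <;> simp only [hadd, hmem]

lemma items_pvMkF (f : String) : (pvMkF f).items = [("field", f)] := by
  rfl

lemma contains_pvMkF (f : String) {k : String} (hk : k ≠ "field") :
    (pvMkF f).contains k = false := by
  have h := items_pvMkF f
  rw [PySem.Dict.contains, h]
  simp [beq_eq_false_iff_ne, Ne.symm hk]

-- the column dict grows by pure appends: all its inserted keys are fresh and pairwise distinct
lemma items_pvAdd (f : String) (c : PySem.Dict String String)
    (l : List (Int × List (String × String)))
    (hpw : l.Pairwise (fun p q => p.1 < q.1)) (hnn : ∀ p ∈ l, 0 ≤ p.1)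
    (hfresh : ∀ p ∈ l, c.contains (pvColKey p.1) = false) :
    (pvAdd f c l).items = c.items ++ pvCols f l := by
  induction l generalizing c with
  | nil => simp [pvAdd, pvCols]
  | cons p l ih =>
    rw [List.pairwise_cons] at hpw
    cases hfind : pvFind f p.2 with
    | none =>
      have h1 : pvAdd f c (p :: l) = pvAdd f c l := by rw [pvAdd, List.foldl_cons, hfind]; rfl
      have h2 : pvCols f (p :: l) = pvCols f l := by rw [pvCols, List.flatMap_cons, hfind]; simp [pvCols]
      rw [h1, h2]
      exact ih c hpw.2 (fun q hq => hnn q (List.mem_cons_of_mem _ hq))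
        (fun q hq => hfresh q (List.mem_cons_of_mem _ hq))
    | some kv =>
      have h1 : pvAdd f c (p :: l) = pvAdd f (c.insert (pvColKey p.1) kv.2) l := by
        rw [pvAdd, List.foldl_cons, hfind]; rfl
      have h2 : pvCols f (p :: l) = (pvColKey p.1, kv.2) :: pvCols f l := by
        rw [pvCols, List.flatMap_cons, hfind]; simp [pvCols]
      rw [h1, h2, ih _ hpw.2 (fun q hq => hnn q (List.mem_cons_of_mem _ hq))]
      · rw [PySem.Dict.items_insert_of_not_contains _ _ (hfresh p List.mem_cons_self)]
        simp
      · intro q hq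
        rw [PySem.Dict.contains_insert]
        have hne : (pvColKey q.1 == pvColKey p.1) = false := by
          rw [beq_eq_false_iff_ne]
          intro he
          have := pvColKey_inj (hnn q (List.mem_cons_of_mem _ hq)) (hnn p List.mem_cons_self) he
          have := hpw.1 q hq
          omega
        rw [hne]
        simpa using hfresh q (List.mem_cons_of_mem _ hq)

-- the two ports, restated through the abbreviations
lemma pvA_eq (rows : List (List (String × String))) :
    pivot_rows_to_columns rows =
      if rows = [] then []
      else (pvOuter PySem.Dict.empty (PySem.List.enumerate rows 0)).values.map (fun d => d.items) := rfl

lemma pvB_eq (rows : List (List (String × String))) :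
    pivot_rows_to_columns_alt rows =
      (PySem.Set.ofList (rows.flatMap (fun row => row.map (·.1)))).map
        (fun f => [("field", f)] ++ pvCols f (PySem.List.enumerate rows 0)) := by
  rw [pivot_rows_to_columns_alt, PySem.List.dedup]
  apply List.map_congr_left
  intro f _
  have hfun : (fun (col : List (String × String)) (p : Int × List (String × String)) =>
      match p.2.find? (fun kv => kv.1 == f) with
      | some kv => col ++ [(pvColKey p.1, kv.2)]
      | none => col) = (fun col p => col ++
        (match pvFind f p.2 with
         | some kv => [(pvColKey p.1, kv.2)]
         | none => [])) := by
    funext col p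
    cases h : pvFind f p.2 <;> rw [pvFind] at h <;> simp [h]
  rw [hfun, PySem.List.foldl_append_eq_flatMap, pvCols]

lemma flatMap_enumerate_keys (rows : List (List (String × String))) (s : Int) :
    (PySem.List.enumerate rows s).flatMap (fun p => p.2.map Prod.fst) =
      rows.flatMap (fun row => row.map Prod.fst) := by
  induction rows generalizing s with
  | nil => simp [PySem.List.enumerate_nil]
  | cons r rows ih => rw [PySem.List.enumerate_cons, List.flatMap_cons, List.flatMap_cons, ih]

theorem pv_main (rows : List (List (String × String)))
    (hpre : ∀ row ∈ rows, (row.map Prod.fst).Nodup) :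
    pivot_rows_to_columns rows = pivot_rows_to_columns_alt rows := by
  rw [pvA_eq, pvB_eq]
  by_cases hnil : rows = []
  · subst hnil; simp [PySem.Set.ofList]
  · rw [if_neg hnil]
    set l := PySem.List.enumerate rows 0 with hl
    have hkeys : (pvOuter PySem.Dict.empty l).keys
        = PySem.Set.ofList (rows.flatMap (fun row => row.map Prod.fst)) := by
      rw [keys_outer, PySem.Dict.keys_empty, PySem.Set.update_nil_left, flatMap_enumerate_keys]
    have hnd : (pvOuter PySem.Dict.empty l).keys.Nodup := by
      rw [hkeys]; exact PySem.Set.nodup_ofList _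
    rw [PySem.Dict.values_eq_map_keys _ hnd PySem.Dict.empty, List.map_map, hkeys]
    apply List.map_congr_left
    intro f hf
    have hmem : f ∈ l.flatMap (fun p => p.2.map Prod.fst) := by
      rw [hl, flatMap_enumerate_keys]
      exact (PySem.Set.mem_ofList _ _).mp hf
    have hrows : ∀ p ∈ l, (p.2.map Prod.fst).Nodup := by
      intro p hp
      rw [hl, PySem.List.mem_enumerate_iff] at hp
      obtain ⟨k, hk, rfl⟩ := hp
      exact hpre _ (List.getElem_mem hk)
    have hget := get?_outer PySem.Dict.empty l hrows f
    rw [PySem.Dict.get?_empty, if_pos hmem] at hget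
    have hgd : (pvOuter PySem.Dict.empty l).getD f PySem.Dict.empty = pvAdd f (pvMkF f) l :=
      PySem.Dict.getD_of_get?_eq_some _ _ hget
    simp only [Function.comp_apply, hgd]
    rw [items_pvAdd f (pvMkF f) l (hl ▸ PySem.List.pairwise_lt_enumerate rows 0)
      (by intro p hp; rw [hl, PySem.List.mem_enumerate_iff] at hp
          obtain ⟨k, hk, rfl⟩ := hp; simp)
      (fun p hp => contains_pvMkF f (pvColKey_ne_field p.1))]
    rw [items_pvMkF]

-- ===== VERDICT (by name: the statement is the Claim_ definition above) =====
theorem pivot_rows_to_columns_spec : Claim_equal_pivot_rows_to_columns := by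
  intro rows _ hpre
  exact pv_main rows hpre
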